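-- pv_equiv track=rewrite | github.com/yutaokkots/Algorithms-and-Data-Structures | data_structures_and_algorithms/Problems/codesig/codesig_PyL02-019_newStyleFormatting.py | solution
-- ===== SOURCE A (Python) =====
-- def solution(s):
--     dict = {
--         "%d":"{}",
--         "%i":"{}",
--         "%o":"{}",
--         "%u":"{}",
--         "%x":"{}",
--         "%X":"{}",
--         "%e":"{}",
--         "%E":"{}",
--         "%f":"{}",
--         "%F":"{}",
--         "%g":"{}",
--         "%G":"{}",
--         "%c":"{}",
--         "%r":"{}",
--         "%s":"{}",
--         "%%":"%"
--     }
--     left, right = 0, 1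
--     new_sentence = []
--     while right < len(s) + 1:
--         if s[left:right+1] in dict:
--             val = dict[s[left:right+1]]
--             new_sentence.append(val)
--             left +=2
--             right +=2
--             continue
--         new_sentence.append(s[left])
--
--         left += 1
--         right += 1
--
--     return "".join(new_sentence)
-- ===== SOURCE B (Python) =====
-- SPEC = "diouxXeEfFgGcrs"
--
-- def solution(s):
--     # Split on the percent sign; each later part was preceded by one in s.
--     # A nonempty part starting with a specifier consumes that sign; an empty
--     # part means two adjacent signs.
--     parts = s.split('%')
--     res = [parts[0]]
--     i = 1
--     while i < len(parts):
--         p = parts[i]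
--         if p:
--             res.append("{}" + p[1:] if p[0] in SPEC else "%" + p)
--             i += 1
--         elif i + 1 < len(parts):
--             res.append("%" + parts[i + 1])
--             i += 2
--         else:
--             res.append("%")
--             i += 1
--     return "".join(res)
-- ===== Notes on version B (the rewrite author's own statement) =====
-- stated objective: simpler
-- what changed: Replaces A's two-pointer window scan with per-character dict slicing by splitting the string on the percent sign once and rebuilding the result from the parts, so no index arithmetic or slice-window state remains.
import Mathlib
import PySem

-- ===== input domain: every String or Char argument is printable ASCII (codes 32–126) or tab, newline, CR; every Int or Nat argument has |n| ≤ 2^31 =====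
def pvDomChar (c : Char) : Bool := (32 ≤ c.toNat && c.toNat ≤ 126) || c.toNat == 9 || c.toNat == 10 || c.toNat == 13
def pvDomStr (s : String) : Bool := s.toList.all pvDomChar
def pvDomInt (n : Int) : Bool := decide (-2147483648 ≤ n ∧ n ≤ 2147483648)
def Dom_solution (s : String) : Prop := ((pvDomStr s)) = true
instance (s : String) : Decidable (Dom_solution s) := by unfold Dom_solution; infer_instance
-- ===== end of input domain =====

-- B replaces A's hand-rolled two-pointer window scan by splitting on '%' and gluing the parts back (simpler: no index arithmetic).


-- ===== PORT A =====
-- A's dict literal: an association list in insertion order (all 16 keys distinct)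
def pvDictA : PySem.Dict (List Char) (List Char) :=
  PySem.Dict.mk
  [(['%','d'], ['{','}']), (['%','i'], ['{','}']), (['%','o'], ['{','}']),
   (['%','u'], ['{','}']), (['%','x'], ['{','}']), (['%','X'], ['{','}']),
   (['%','e'], ['{','}']), (['%','E'], ['{','}']), (['%','f'], ['{','}']),
   (['%','F'], ['{','}']), (['%','g'], ['{','}']), (['%','G'], ['{','}']),
   (['%','c'], ['{','}']), (['%','r'], ['{','}']), (['%','s'], ['{','}']),
   (['%','%'], ['%'])]

-- A's while loop; the state is the suffix s[left:] (right is always left+1):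
-- s[left:right+1] is the suffix's first two chars, 'left += 2' drops two chars,
-- else s[left] is appended to new_sentence and one char is dropped.
def solutionGoA (s : List Char) : List Char :=
  match s with
  | [] => []
  | c :: rest =>
    match PySem.Dict.get? pvDictA ((c :: rest).take 2) with
    | some v => v ++ solutionGoA (rest.drop 1)
    | none => c :: solutionGoA rest
termination_by s.length
decreasing_by all_goals (simp; try omega)

def solution (s : String) : String := String.ofList (solutionGoA s.toList)

-- ===== PORT B =====
def pvSpecB : List Char := ['d','i','o','u','x','X','e','E','f','F','g','G','c','r','s']

-- Source B's while loop over parts[1:]: each of these parts was preceded by a '%' in s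
def solutionGoB (parts : List (List Char)) : List Char :=
  match parts with
  | [] => []
  | (c :: cs) :: rest =>
      (if pvSpecB.contains c then '{' :: '}' :: cs else '%' :: c :: cs) ++ solutionGoB rest
  | [] :: q :: rest => ('%' :: q) ++ solutionGoB rest
  | [[]] => ['%']

def solution_alt (s : String) : String :=
  match s.toList.splitOn '%' with
  | [] => ""   -- unreachable: split never returns an empty list
  | p0 :: rest => String.ofList (p0 ++ solutionGoB rest)

-- ===== PRECONDITION & SPEC =====
def Spec_solution (s : String) (out : String) : Prop := out = solution_alt s
instance (s : String) (out : String) : Decidable (Spec_solution s out) := by unfold Spec_solution; infer_instance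

-- ===== CLAIM (what is proved, stated in full; the proofs are below) =====
def Claim_equal_solution : Prop := ∀ (s : String), Dom_solution s → Spec_solution s (solution s)

-- ===== LEMMAS AND PROOFS =====

theorem pv_splitOn_nil : ([] : List Char).splitOn '%' = [[]] := by
  simp [List.splitOn, List.splitOnP_nil]

theorem pv_splitOn_pct (u : List Char) : ('%'::u).splitOn '%' = [] :: u.splitOn '%' := by
  simp [List.splitOn, List.splitOnP_cons]

theorem pv_splitOn_cons_ne (u : List Char) (c : Char) (h : c ≠ '%') :
    (c::u).splitOn '%' = (u.splitOn '%').modifyHead (c :: ·) := by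
  simp [List.splitOn, List.splitOnP_cons, h]

theorem pv_splitOn_ne_nil (u : List Char) : u.splitOn '%' ≠ [] :=
  List.splitOnP_ne_nil _ u

-- every dict key starts with '%'
theorem pv_get?_ne_pct (c : Char) (l : List Char) (h : c ≠ '%') :
    PySem.Dict.get? pvDictA (c :: l) = none := by
  have h' : ('%' == c) = false := beq_eq_false_iff_ne.mpr (Ne.symm h)
  simp [pvDictA, PySem.Dict.get?, List.find?, h']

-- every dict key has two characters
theorem pv_get?_single : PySem.Dict.get? pvDictA ['%'] = none := by decide

-- the dict lookup of a two-character window, characterised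
theorem pv_get?_pair (d : Char) :
    PySem.Dict.get? pvDictA ['%', d] =
      if d = '%' then some ['%']
      else if pvSpecB.contains d then some ['{','}'] else none := by
  by_cases h : d = '%'
  · subst h; decide
  · by_cases hmem : d ∈ pvSpecB
    · rw [if_neg h, if_pos (by simpa using hmem)]
      fin_cases hmem <;> decide
    · rw [if_neg h, if_neg (by simpa using hmem)]
      simp only [pvSpecB, List.mem_cons, List.not_mem_nil, or_false, not_or] at hmem
      obtain ⟨n1,n2,n3,n4,n5,n6,n7,n8,n9,n10,n11,n12,n13,n14,n15⟩ := hmem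
      simp [pvDictA, PySem.Dict.get?, List.find?, beq_eq_false_iff_ne.mpr (Ne.symm h),
        beq_eq_false_iff_ne.mpr (Ne.symm n1), beq_eq_false_iff_ne.mpr (Ne.symm n2),
        beq_eq_false_iff_ne.mpr (Ne.symm n3), beq_eq_false_iff_ne.mpr (Ne.symm n4),
        beq_eq_false_iff_ne.mpr (Ne.symm n5), beq_eq_false_iff_ne.mpr (Ne.symm n6),
        beq_eq_false_iff_ne.mpr (Ne.symm n7), beq_eq_false_iff_ne.mpr (Ne.symm n8),
        beq_eq_false_iff_ne.mpr (Ne.symm n9), beq_eq_false_iff_ne.mpr (Ne.symm n10),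
        beq_eq_false_iff_ne.mpr (Ne.symm n11), beq_eq_false_iff_ne.mpr (Ne.symm n12),
        beq_eq_false_iff_ne.mpr (Ne.symm n13), beq_eq_false_iff_ne.mpr (Ne.symm n14),
        beq_eq_false_iff_ne.mpr (Ne.symm n15)]

-- A's scan equals B's split-and-glue, by strong induction on the length
theorem pv_main : ∀ (n : Nat) (cs : List Char), cs.length ≤ n →
    solutionGoA cs = (cs.splitOn '%').headI ++ solutionGoB (cs.splitOn '%').tail := by
  intro n
  induction n with
  | zero =>
    intro cs h
    have : cs = [] := List.eq_nil_of_length_eq_zero (Nat.le_zero.mp h)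
    subst this
    simp [solutionGoA, solutionGoB]
  | succ n ih =>
    intro cs h
    match cs with
    | [] => simp [solutionGoA, solutionGoB]
    | c :: rest =>
      by_cases hc : c = '%'
      · subst hc
        match rest with
        | [] =>
          rw [solutionGoA]
          rw [show (List.take 2 ['%']) = ['%'] from rfl, pv_get?_single]
          rw [pv_splitOn_pct, pv_splitOn_nil]
          simp [solutionGoA, solutionGoB]
        | d :: rest' =>
          rw [solutionGoA]
          have htake : (('%'::d::rest').take 2) = ['%', d] := by simp
          rw [htake, pv_get?_pair d]
          obtain ⟨h1, t1, hsp⟩ : ∃ h1 t1, rest'.splitOn '%' = h1 :: t1 := by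
            cases hrec : rest'.splitOn '%' with
            | nil => exact absurd hrec (pv_splitOn_ne_nil rest')
            | cons a b => exact ⟨a, b, rfl⟩
          have ihr : solutionGoA rest' = h1 ++ solutionGoB t1 := by
            have := ih rest' (by simp at h; omega)
            rwa [hsp] at this
          by_cases hd : d = '%'
          · subst hd
            simp only [List.drop]
            rw [pv_splitOn_pct, pv_splitOn_pct, hsp]
            simp [solutionGoB, ihr]
          · rw [if_neg hd]
            by_cases hspec : pvSpecB.contains d
            · rw [if_pos hspec]
              simp only [List.drop]
              rw [pv_splitOn_pct, pv_splitOn_cons_ne _ _ hd, hsp]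
              simp [solutionGoB, show d ∈ pvSpecB from by simpa using hspec, ihr]
            · rw [if_neg hspec]
              have inner : solutionGoA (d :: rest') = d :: solutionGoA rest' := by
                rw [solutionGoA]
                have : PySem.Dict.get? pvDictA ((d :: rest').take 2) = none := by
                  cases rest' <;> simp [pv_get?_ne_pct d _ hd]
                rw [this]
              rw [pv_splitOn_pct, pv_splitOn_cons_ne _ _ hd, hsp]
              simp only [List.modifyHead, List.headI, List.tail]
              rw [inner, ihr]
              simp [solutionGoB, show ¬ d ∈ pvSpecB from by simpa using hspec]
      · -- c ≠ '%': emit c, advance one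
        rw [solutionGoA]
        have : PySem.Dict.get? pvDictA ((c :: rest).take 2) = none := by
          cases rest <;> simp [pv_get?_ne_pct c _ hc]
        rw [this]
        obtain ⟨h1, t1, hsp⟩ : ∃ h1 t1, rest.splitOn '%' = h1 :: t1 := by
          cases hrec : rest.splitOn '%' with
          | nil => exact absurd hrec (pv_splitOn_ne_nil rest)
          | cons a b => exact ⟨a, b, rfl⟩
        have ihr : solutionGoA rest = h1 ++ solutionGoB t1 := by
          have := ih rest (by simp at h; omega)
          rwa [hsp] at this
        rw [pv_splitOn_cons_ne _ _ hc, hsp]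
        simp [ihr]

-- ===== VERDICT (by name: the statement is the Claim_ definition above) =====
theorem solution_spec : Claim_equal_solution := by
  intro s _
  unfold Spec_solution solution solution_alt
  have := pv_main s.toList.length s.toList (le_refl _)
  cases hsp : s.toList.splitOn '%' with
  | nil => exact absurd hsp (pv_splitOn_ne_nil _)
  | cons p0 rest =>
    rw [hsp] at this
    simp only [List.headI, List.tail] at this
    rw [this]
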